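-- pv_equiv track=rewrite | github.com/zhangyuejoslin/algorithms | algorithm_homework/homework2.py | satellite2
-- ===== SOURCE A (Python) =====
-- def satellite2(num, input_list):
--     index_list = [s1-s2 for s1,s2 in input_list]
--     flipped_add_index = []
--     total_num = 0
--     for index_id, each_index in enumerate(index_list[::-1]):
--         total_num += each_index
--         flipped_add_index.append(total_num)
--
--     new_index = flipped_add_index[::-1]
--     return new_index.index(max(new_index))
-- ===== SOURCE B (Python) =====
-- def satellite2(num, input_list):
--     # suffix_sum[i] = total - prefix_sum[i], so the first argmax of the
--     # suffix sums is the first argmin of the prefix sums: one forward pass.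
--     p = 0
--     best_p = None
--     best_i = 0
--     for i, (s1, s2) in enumerate(input_list):
--         if best_p is None or p < best_p:
--             best_p = p
--             best_i = i
--         p += s1 - s2
--     if best_p is None:
--         raise ValueError("satellite2() arg is an empty sequence")
--     return best_i
-- ===== Notes on version B (the rewrite author's own statement) =====
-- stated objective: alternative
-- what changed: Replaces A's build-diff-list / reverse / cumulative-sum / reverse / max+index pipeline by a single forward pass tracking the running prefix sum and its first strict minimum, using suffix_sum[i] = total - prefix_sum[i].
import Mathlib
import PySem

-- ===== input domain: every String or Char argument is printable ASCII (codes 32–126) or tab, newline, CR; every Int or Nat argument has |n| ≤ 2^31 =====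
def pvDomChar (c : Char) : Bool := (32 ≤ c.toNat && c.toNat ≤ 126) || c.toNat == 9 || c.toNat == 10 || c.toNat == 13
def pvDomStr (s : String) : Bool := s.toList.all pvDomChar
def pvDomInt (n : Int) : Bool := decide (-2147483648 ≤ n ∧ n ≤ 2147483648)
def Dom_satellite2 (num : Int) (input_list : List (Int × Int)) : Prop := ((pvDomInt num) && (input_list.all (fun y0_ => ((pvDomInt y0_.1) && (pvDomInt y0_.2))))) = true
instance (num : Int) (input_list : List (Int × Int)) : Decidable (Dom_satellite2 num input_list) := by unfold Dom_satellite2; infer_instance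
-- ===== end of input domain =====

-- B replaces A's 5-pass pipeline (diff list, reverse, cumulative sums, reverse, max+index)
-- by one forward pass tracking the first strict minimum of the running prefix sum
-- (suffix_sum[i] = total - prefix_sum[i]); objective: alternative (one pass, O(1) extra space).

-- ===== PORT A =====
def satellite2 (num : Int) (input_list : List (Int × Int)) : Int :=
  let index_list := input_list.map (fun p => p.1 - p.2)
  -- index_list[::-1]
  let rev := (PySem.List.slice? index_list none none (-1)).getD []
  -- for each_index in rev: total_num += each_index; flipped_add_index.append(total_num)
  let st := rev.foldl (fun (st : Int × List Int) x => (st.1 + x, st.2 ++ [st.1 + x])) (0, ([] : List Int))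
  -- new_index = flipped_add_index[::-1]
  let new_index := (PySem.List.slice? st.2 none none (-1)).getD []
  match PySem.List.max? new_index (fun y => y) with
  | some m => ((PySem.List.index? new_index m).getD 0 : Nat)
  | none => 0  -- Python: max([]) raises ValueError; excluded by Pre_satellite2

-- ===== PORT B =====
def altLoop : List (Int × Int) → Int → Int → Option Int → Int → Option Int × Int
  | [], _, _, bp, bi => (bp, bi)
  | (s1, s2) :: rest, i, p, bp, bi =>
    -- if best_p is None or p < best_p: best_p, best_i = p, i
    match bp with
    | none => altLoop rest (i + 1) (p + (s1 - s2)) (some p) i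
    | some b =>
      if p < b then altLoop rest (i + 1) (p + (s1 - s2)) (some p) i
      else altLoop rest (i + 1) (p + (s1 - s2)) (some b) bi

def satellite2_alt (num : Int) (input_list : List (Int × Int)) : Int :=
  (altLoop input_list 0 0 none 0).2  -- best_p = None at the end (empty list) raises; excluded by Pre_satellite2

-- ===== PRECONDITION & SPEC =====
-- Pre_ excludes only the empty list, on which A raises ValueError (max of an empty sequence), as does B.
def Pre_satellite2 (num : Int) (input_list : List (Int × Int)) : Prop := input_list ≠ []
instance (num : Int) (input_list : List (Int × Int)) : Decidable (Pre_satellite2 num input_list) := by unfold Pre_satellite2; infer_instance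

def pvWitness_satellite2 : Int × (List (Int × Int)) := (0, [(3, 1), (0, 2), (5, 0)])

def Spec_satellite2 (num : Int) (input_list : List (Int × Int)) (out : Int) : Prop := out = satellite2_alt num input_list
instance (num : Int) (input_list : List (Int × Int)) (out : Int) : Decidable (Spec_satellite2 num input_list out) := by unfold Spec_satellite2; infer_instance

-- ===== CLAIM (what is proved, stated in full; the proofs are below) =====
def Claim_equal_satellite2 : Prop := ∀ (num : Int) (input_list : List (Int × Int)), Dom_satellite2 num input_list → Pre_satellite2 num input_list → Spec_satellite2 num input_list (satellite2 num input_list)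

-- ===== LEMMAS AND PROOFS =====

-- proof-only helpers
def pvDiffs (l : List (Int × Int)) : List Int := l.map (fun p => p.1 - p.2)

/-- cumulative sums starting from accumulator `t` (each element included). -/
def pvCums : Int → List Int → List Int
  | _, [] => []
  | t, x :: xs => (t + x) :: pvCums (t + x) xs

/-- proper-prefix sums, starting prefix `p`. -/
def pvPrefs : Int → List Int → List Int
  | _, [] => []
  | p, x :: xs => p :: pvPrefs (p + x) xs

/-- suffix sums. -/
def pvSufs : List Int → List Int
  | [] => []
  | x :: xs => (x + xs.sum) :: pvSufs xs

def pvMinL : List Int → Option Int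
  | [] => none
  | x :: xs => some (match pvMinL xs with | none => x | some m => min x m)

/-- index of the first minimum (0 on []). -/
def pvFam : List Int → Nat
  | [] => 0
  | x :: xs =>
    match pvMinL xs with
    | none => 0
    | some m => if m < x then pvFam xs + 1 else 0

/-- B's loop re-expressed over the list of prefix sums. -/
def pvALoop : List Int → Int → Option Int → Int → Option Int × Int
  | [], _, bp, bi => (bp, bi)
  | q :: rest, i, bp, bi =>
    match bp with
    | none => pvALoop rest (i + 1) (some q) i
    | some b =>
      if q < b then pvALoop rest (i + 1) (some q) i
      else pvALoop rest (i + 1) (some b) bi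

theorem pv_foldl_cums (l : List Int) : ∀ (t : Int) (acc : List Int),
    l.foldl (fun (st : Int × List Int) x => (st.1 + x, st.2 ++ [st.1 + x])) (t, acc)
      = (t + l.sum, acc ++ pvCums t l) := by
  induction l with
  | nil => intro t acc; simp [pvCums]
  | cons x xs ih =>
      intro t acc
      simp only [List.foldl_cons, ih, pvCums, List.sum_cons, Prod.mk.injEq,
        List.append_assoc, List.singleton_append]
      exact ⟨by ring, trivial⟩

theorem pvCums_append (u v : List Int) : ∀ t, pvCums t (u ++ v) = pvCums t u ++ pvCums (t + u.sum) v := by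
  induction u with
  | nil => intro t; simp [pvCums]
  | cons x xs ih => intro t; simp [pvCums, ih, add_assoc]

theorem pvCums_rev_rev (d : List Int) : (pvCums 0 d.reverse).reverse = pvSufs d := by
  induction d with
  | nil => simp [pvCums, pvSufs]
  | cons x xs ih =>
      rw [List.reverse_cons, pvCums_append, List.reverse_append, ih]
      simp only [pvCums, List.reverse_cons, List.reverse_nil, List.nil_append,
        List.singleton_append, List.sum_reverse, pvSufs, zero_add]
      rw [show xs.sum + x = x + xs.sum from by ring]

theorem pvSufs_eq_map_prefs (d : List Int) : ∀ (p c : Int), c = p + d.sum →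
    (pvPrefs p d).map (fun q => c - q) = pvSufs d := by
  induction d with
  | nil => intro p c h; simp [pvPrefs, pvSufs]
  | cons x xs ih =>
      intro p c h
      simp only [pvPrefs, pvSufs, List.map_cons, List.sum_cons] at *
      rw [show c - p = x + xs.sum by omega, ih (p + x) c (by omega)]

theorem pv_foldl_min (t : List Int) : ∀ x : Int,
    t.foldl min x = match pvMinL t with | none => x | some m => min x m := by
  induction t with
  | nil => intro x; simp [pvMinL]
  | cons y ys ih =>
      intro x
      simp only [List.foldl_cons, ih, pvMinL]
      cases pvMinL ys with
      | none => simp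
      | some m => simp

theorem pv_min?_eq_minL (L : List Int) :
    PySem.List.min? L (fun y => y) = pvMinL L := by
  cases L with
  | nil => simp [PySem.List.min?, pvMinL]
  | cons x t =>
      rw [PySem.List.min?_id_cons, pvMinL, pv_foldl_min t x]

theorem pv_foldl_max_map (c : Int) (t : List Int) : ∀ x : Int,
    (t.map (fun q => c - q)).foldl max (c - x) = c - t.foldl min x := by
  induction t with
  | nil => intro x; simp
  | cons y ys ih =>
      intro x
      simp only [List.map_cons, List.foldl_cons]
      have h : max (c - x) (c - y) = c - min x y := by omega
      rw [h, ih]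

theorem pv_max?_map (c : Int) (L : List Int) :
    PySem.List.max? (L.map (fun q => c - q)) (fun y => y)
      = (PySem.List.min? L (fun y => y)).map (fun q => c - q) := by
  cases L with
  | nil => simp [PySem.List.max?, PySem.List.min?]
  | cons x t =>
      simp only [List.map_cons]
      rw [PySem.List.max?_id_cons, PySem.List.min?_id_cons, pv_foldl_max_map c t x]
      simp

theorem pv_index?_map (c : Int) (L : List Int) (v : Int) :
    PySem.List.index? (L.map (fun q => c - q)) (c - v) = PySem.List.index? L v := by
  induction L with
  | nil => simp [PySem.List.index?]
  | cons x xs ih =>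
      by_cases hx : x = v
      · subst hx
        rw [List.map_cons, PySem.List.index?_cons_self, PySem.List.index?_cons_self]
      · have hx' : c - x ≠ c - v := by omega
        rw [List.map_cons, PySem.List.index?_cons_of_ne _ hx',
          PySem.List.index?_cons_of_ne _ hx, ih]

theorem pvMinL_mem (L : List Int) (m : Int) (h : pvMinL L = some m) : m ∈ L := by
  induction L generalizing m with
  | nil => simp [pvMinL] at h
  | cons x xs ih =>
      simp only [pvMinL] at h
      cases hm : pvMinL xs with
      | none => rw [hm] at h; simp at h; simp [h]
      | some m' =>
          rw [hm] at h
          simp at h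
          rcases min_cases x m' with ⟨he, _⟩ | ⟨he, _⟩
          · simp [← h, he]
          · have heq : m = m' := by omega
            subst heq
            right; exact ih m hm

theorem pv_index_min_eq_fam (L : List Int) (m : Int) (h : pvMinL L = some m) :
    (PySem.List.index? L m).getD 0 = pvFam L := by
  induction L generalizing m with
  | nil => simp [pvMinL] at h
  | cons x xs ih =>
      simp only [pvMinL] at h
      cases hm : pvMinL xs with
      | none =>
          rw [hm] at h; simp at h
          have hx : xs = [] := by cases xs <;> simp_all [pvMinL]
          subst hx
          rw [← h, PySem.List.index?_cons_self]
          simp [pvFam, pvMinL]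
      | some m' =>
          rw [hm] at h; simp at h
          by_cases hlt : m' < x
          · have hmv : m = m' := by omega
            subst hmv
            have hne : x ≠ m := by omega
            rw [PySem.List.index?_cons_of_ne _ hne]
            have hsome : (PySem.List.index? xs m).isSome := by
              rw [PySem.List.index?_isSome_iff]
              exact pvMinL_mem xs m hm
            rcases Option.isSome_iff_exists.mp hsome with ⟨k, hk⟩
            simp only [pvFam, hm, if_pos hlt]
            rw [hk]
            have := ih m hm
            rw [hk] at this
            simp at this ⊢
            omega
          · have hmv : m = x := by omega
            subst hmv
            rw [PySem.List.index?_cons_self]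
            simp [pvFam, hm, hlt]

theorem pv_aLoop_fam (L : List Int) : ∀ (i b bi : Int),
    (pvALoop L i (some b) bi).2 =
      match pvMinL L with
      | none => bi
      | some m => if m < b then i + (pvFam L : Int) else bi := by
  induction L with
  | nil => intro i b bi; simp [pvALoop, pvMinL]
  | cons x xs ih =>
      intro i b bi
      simp only [pvALoop, pvMinL]
      by_cases hx : x < b
      · rw [if_pos hx, ih]
        cases hm : pvMinL xs with
        | none => simp [pvFam, hm, hx]
        | some m' =>
            simp only [pvFam, hm]
            by_cases h1 : m' < x
            · have h2 : min x m' = m' := by omega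
              have h3 : m' < b := by omega
              simp only [if_pos h1, h2, if_pos h3]
              push_cast
              ring
            · have : min x m' = x := by omega
              simp [h1, this, hx]
      · rw [if_neg hx, ih]
        cases hm : pvMinL xs with
        | none => simp [pvFam, hm, hx]
        | some m' =>
            simp only [pvFam, hm]
            by_cases h1 : m' < b
            · have h2 : m' < x := by omega
              have h3 : min x m' = m' := by omega
              simp only [if_pos h1, if_pos h2, h3]
              push_cast
              ring
            · have : ¬ min x m' < b := by omega
              simp [h1, this]

theorem pv_altLoop_eq (xs : List (Int × Int)) : ∀ (i p : Int) (bp : Option Int) (bi : Int),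
    altLoop xs i p bp bi = pvALoop (pvPrefs p (pvDiffs xs)) i bp bi := by
  induction xs with
  | nil => intro i p bp bi; simp [altLoop, pvDiffs, pvPrefs, pvALoop]
  | cons q rest ih =>
      intro i p bp bi
      obtain ⟨s1, s2⟩ := q
      simp only [altLoop, pvDiffs, List.map_cons, pvPrefs, pvALoop]
      cases bp with
      | none => exact ih (i + 1) (p + (s1 - s2)) (some p) i
      | some b =>
          simp only
          by_cases h : p < b
          · rw [if_pos h, if_pos h]; exact ih _ _ _ _
          · rw [if_neg h, if_neg h]; exact ih _ _ _ _

theorem pv_B_eq_fam (x : Int × Int) (rest : List (Int × Int)) (num : Int) :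
    satellite2_alt num (x :: rest) = (pvFam (pvPrefs 0 (pvDiffs (x :: rest))) : Int) := by
  obtain ⟨s1, s2⟩ := x
  show (altLoop ((s1, s2) :: rest) 0 0 none 0).2 = _
  rw [pv_altLoop_eq]
  simp only [pvDiffs, List.map_cons, pvPrefs, pvALoop, zero_add, pv_aLoop_fam]
  cases hm : pvMinL (pvPrefs (s1 - s2) (List.map (fun p => p.1 - p.2) rest)) with
  | none =>
      have hnil : pvPrefs (s1 - s2) (List.map (fun p => p.1 - p.2) rest) = [] := by
        cases h : pvPrefs (s1 - s2) (List.map (fun p => p.1 - p.2) rest) with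
        | nil => rfl
        | cons a b => rw [h] at hm; simp [pvMinL] at hm
      simp [pvFam, pvMinL, hnil]
  | some m' =>
      simp only [pvFam, hm]
      by_cases h1 : m' < 0
      · simp only [if_pos h1]
        push_cast
        ring
      · simp [h1]

theorem pv_A_eq_fam (x : Int × Int) (rest : List (Int × Int)) (num : Int) :
    satellite2 num (x :: rest) = (pvFam (pvPrefs 0 (pvDiffs (x :: rest))) : Int) := by
  obtain ⟨s1, s2⟩ := x
  simp only [pvDiffs]
  simp only [satellite2, PySem.List.slice?_none_none_neg_one, Option.getD_some,
    pv_foldl_cums, List.nil_append]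
  rw [pvCums_rev_rev]
  set d := List.map (fun p => p.1 - p.2) ((s1, s2) :: rest) with hd
  have hmap : (pvPrefs 0 d).map (fun q => d.sum - q) = pvSufs d :=
    pvSufs_eq_map_prefs d 0 d.sum (by ring)
  rw [← hmap, pv_max?_map, pv_min?_eq_minL]
  cases hm : pvMinL (pvPrefs 0 d) with
  | none =>
      exfalso
      rw [hd, List.map_cons] at hm
      simp [pvPrefs, pvMinL] at hm
  | some m =>
      simp only [Option.map_some]
      rw [pv_index?_map, pv_index_min_eq_fam _ m hm]

-- ===== VERDICT (by name: the statement is the Claim_ definition above) =====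
theorem satellite2_spec : Claim_equal_satellite2 := by
  intro num input_list _ hpre
  unfold Spec_satellite2
  cases input_list with
  | nil => exact absurd rfl hpre
  | cons x rest => rw [pv_A_eq_fam, pv_B_eq_fam]
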